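-- pv_equiv track=rewrite | github.com/jpbruneton/QDSR | core/Simplification_Rules.py | simplify_0_op
-- ===== SOURCE A (Python) =====
-- def simplify_0_op(pf):
--     if len(pf) <=1:
--         return pf
--     newpf = []
--     i = 0
--     while i <= len(pf) - 2:
--         if pf[i] in ['0'] and pf[i + 1] in ['+', '-']:
--             i += 2 #empty operation
--             break
--         else:
--             newpf.append(pf[i])
--             i += 1
--     newpf += pf[i:]
--     return newpf
-- ===== SOURCE B (Python) =====
-- def simplify_0_op(pf):
--     if len(pf) <= 1:
--         return pf
--     idx = next((i for i, (x, y) in enumerate(zip(pf, pf[1:]))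
--                 if x == '0' and y in ('+', '-')), None)
--     if idx is None:
--         return pf[:]
--     return pf[:idx] + pf[idx + 2:]
-- ===== Notes on version B (the rewrite author's own statement) =====
-- stated objective: simpler
-- what changed: Replaces A's interleaved append-while-copying loop with a pure search for the first '0'/op adjacent pair followed by slice-based reconstruction.
import Mathlib
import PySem

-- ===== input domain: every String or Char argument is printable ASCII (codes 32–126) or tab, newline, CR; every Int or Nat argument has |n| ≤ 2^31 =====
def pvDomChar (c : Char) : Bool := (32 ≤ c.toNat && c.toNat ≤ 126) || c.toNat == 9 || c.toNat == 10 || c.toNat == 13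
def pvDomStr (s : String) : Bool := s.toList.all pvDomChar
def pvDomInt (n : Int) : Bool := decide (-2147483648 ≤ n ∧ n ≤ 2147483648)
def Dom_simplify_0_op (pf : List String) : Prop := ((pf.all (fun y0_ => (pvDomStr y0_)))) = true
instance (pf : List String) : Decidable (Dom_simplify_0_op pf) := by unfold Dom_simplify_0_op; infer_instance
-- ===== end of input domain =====

-- B replaces A's interleaved append-while-copying loop with a search for the
-- first '0'/operator pair followed by slice reconstruction (objective: simpler).


-- ===== PORT A =====
-- A's while loop: while at least two tokens remain, either drop the '0'/op pair
-- and stop (break), or move the head token into the accumulator and continue.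
def simplify_0_op_loopA (l : List String) : List String :=
  match l with
  | x :: y :: rest =>
      if x = "0" ∧ (y = "+" ∨ y = "-") then rest
      else x :: simplify_0_op_loopA (y :: rest)
  | _ => l

def simplify_0_op (pf : List String) : List String :=
  if pf.length ≤ 1 then pf else simplify_0_op_loopA pf

-- ===== PORT B =====
-- B: find the index of the first adjacent ('0', op) pair, then slice it out.
def simplify_0_op_alt (pf : List String) : List String :=
  if pf.length ≤ 1 then pf
  else
    match (pf.zip pf.tail).findIdx?
        (fun p => decide (p.1 = "0" ∧ (p.2 = "+" ∨ p.2 = "-"))) with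
    | some i => pf.take i ++ pf.drop (i + 2)
    | none => pf

-- ===== PRECONDITION & SPEC =====
def Spec_simplify_0_op (pf : List String) (out : List String) : Prop := out = simplify_0_op_alt pf
instance (pf : List String) (out : List String) : Decidable (Spec_simplify_0_op pf out) := by unfold Spec_simplify_0_op; infer_instance

-- ===== CLAIM (what is proved, stated in full; the proofs are below) =====
def Claim_equal_simplify_0_op : Prop := ∀ (pf : List String), Dom_simplify_0_op pf → Spec_simplify_0_op pf (simplify_0_op pf)

-- ===== LEMMAS AND PROOFS =====
theorem simplify_0_op_loopA_eq (l : List String) :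
    simplify_0_op_loopA l =
      match (l.zip l.tail).findIdx?
          (fun p => decide (p.1 = "0" ∧ (p.2 = "+" ∨ p.2 = "-"))) with
      | some i => l.take i ++ l.drop (i + 2)
      | none => l := by
  induction l with
  | nil => simp [simplify_0_op_loopA]
  | cons x xs ih =>
    cases xs with
    | nil => simp [simplify_0_op_loopA]
    | cons y rest =>
      simp only [simplify_0_op_loopA, List.tail_cons, List.zip_cons_cons,
        List.findIdx?_cons]
      by_cases h : x = "0" ∧ (y = "+" ∨ y = "-")
      · simp [h]
      · simp only [h, decide_false, if_false]
        rw [ih]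
        simp only [List.tail_cons]
        cases hf : (((y :: rest).zip rest).findIdx?
            (fun p => decide (p.1 = "0" ∧ (p.2 = "+" ∨ p.2 = "-")))) with
        | none => simp
        | some i => simp [List.take_succ_cons, List.drop_succ_cons]

-- ===== VERDICT (by name: the statement is the Claim_ definition above) =====
theorem simplify_0_op_spec : Claim_equal_simplify_0_op := by
  intro pf _
  unfold Spec_simplify_0_op simplify_0_op simplify_0_op_alt
  by_cases h : pf.length ≤ 1
  · simp [h]
  · simp only [h, if_false]
    exact simplify_0_op_loopA_eq pf
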